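-- pv_equiv track=rewrite | github.com/ovenzeze/Muyan-TTS | tests/test_text_utils.py | fix_spaced_caps
-- ===== SOURCE A (Python) =====
-- def fix_spaced_caps(text):
--     words = text.split()
--     result = []
--     i = 0
--
--     while i < len(words):
--         current_word = words[i]
--         # Check if the word is a single uppercase letter
--         if len(current_word) == 1 and current_word.isupper():
--             combined = current_word
--             j = i + 1
--             # Check subsequent words to merge consecutive single uppercase letters
--             while j < len(words):
--                 next_word = words[j]
--                 # If it's a single uppercase letter, continue merging
--                 if len(next_word) == 1 and next_word.isupper():
--                     combined += next_word
--                     j += 1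
--                 # If the next word starts with an uppercase letter and has a suffix (e.g., 's), merge the first letter and keep the suffix
--                 elif next_word[0].isupper() and len(next_word) > 1 and not next_word[1:].isalnum():
--                     combined += next_word[0]  # Take only the first letter
--                     combined += next_word[1:]  # Append the remaining part
--                     j += 1
--                     break
--                 else:
--                     break
--             # If multiple words were merged, add the combined result
--             if j > i + 1:
--                 result.append(combined)
--                 i = j
--             else:
--                 # If only one uppercase letter and no merging conditions are met, add it separately
--                 result.append(current_word)
--                 i += 1
--         else:
--             result.append(current_word)
--             i += 1
--
--     return ' '.join(result)
-- ===== SOURCE B (Python) =====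
-- def fix_spaced_caps(text):
--     out = []
--     run = ""  # pending run of consecutive single uppercase letters
--     for w in text.split():
--         if len(w) == 1 and w.isupper():
--             run += w
--         elif run and w[0].isupper() and len(w) > 1 and not w[1:].isalnum():
--             # a suffix-like word (e.g. "'s") ends the run and merges into it
--             out.append(run + w)
--             run = ""
--         else:
--             if run:
--                 out.append(run)
--                 run = ""
--             out.append(w)
--     if run:
--         out.append(run)
--     return ' '.join(out)
-- ===== Notes on version B (the rewrite author's own statement) =====
-- stated objective: simpler
-- what changed: Replaced A's nested while loops with explicit indices i/j and a merged-count commit guard by a single flat pass over the words that keeps a running buffer of the current capital-letter run and flushes it when the run ends; the >1-merge guard disappears because a one-letter run flushes as itself.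
import Mathlib
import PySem

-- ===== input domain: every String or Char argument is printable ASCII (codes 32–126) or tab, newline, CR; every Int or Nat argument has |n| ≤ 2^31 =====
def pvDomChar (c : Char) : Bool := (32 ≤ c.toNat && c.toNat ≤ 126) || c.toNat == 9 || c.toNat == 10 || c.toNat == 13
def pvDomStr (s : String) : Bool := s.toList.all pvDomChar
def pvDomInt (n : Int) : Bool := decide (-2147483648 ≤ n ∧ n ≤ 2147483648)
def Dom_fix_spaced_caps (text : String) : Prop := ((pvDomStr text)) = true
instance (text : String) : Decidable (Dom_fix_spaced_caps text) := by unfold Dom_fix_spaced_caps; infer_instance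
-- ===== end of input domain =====

-- B replaces A's nested index-driven while loops (with a merged-count commit guard) by a single
-- flat pass keeping a running buffer of the current capital-letter run; same values, same cost.

-- hand port of Python str.isupper (≥1 cased char, no cased char lowercase); exact on ASCII,
-- where the cased characters are exactly the letters
def pvStrIsupper (cs : List Char) : Bool :=
  cs.any PySem.Chars.isalpha && !(cs.any PySem.Chars.islower)

-- ===== PORT A =====
-- A's inner `while j < len(words)` loop, recursing over the words after position i;
-- returns (combined, j - (i+1)) i.e. the merged string and how many extra words were consumed
def fscInnerA : List (List Char) → List Char → List Char × Nat
  | [], combined => (combined, 0)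
  | w :: rest, combined =>
    if PySem.Chars.len w == 1 && pvStrIsupper w then
      let p := fscInnerA rest (combined ++ w)
      (p.1, p.2 + 1)
    else if ((PySem.List.pyGet? w (0 : Int)).elim false PySem.Chars.isupper)
            && decide (1 < PySem.Chars.len w)
            && !(PySem.Chars.strIsalnum (PySem.List.slice w (some (1 : Int)) none)) then
      -- next_word[0]: words produced by split() are nonempty, so pyGet? is `some` here;
      -- `.elim [] (fun c => [c])` totalises the unreachable `none` case
      (combined ++ (PySem.List.pyGet? w (0 : Int)).elim [] (fun c => [c])
                ++ PySem.List.slice w (some (1 : Int)) none, 1)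
    else (combined, 0)

-- A's outer `while i < len(words)` loop; `result` is the accumulator list
def fscOuterA : List (List Char) → List (List Char) → List (List Char)
  | [], result => result
  | w :: rest, result =>
    if PySem.Chars.len w == 1 && pvStrIsupper w then
      let p := fscInnerA rest w
      if p.2 > 0 then fscOuterA (rest.drop p.2) (result ++ [p.1])
      else fscOuterA rest (result ++ [w])
    else fscOuterA rest (result ++ [w])
termination_by ws _ => ws.length
decreasing_by
  · simp only [List.length_drop, List.length_cons]; omega
  · simp only [List.length_cons]; omega
  · simp only [List.length_cons]; omega

def fix_spaced_caps (text : String) : String :=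
  String.ofList (PySem.Chars.join [' '] (fscOuterA (PySem.Chars.split₀ text.toList) []))

-- ===== PORT B =====
-- one step of B's flat loop; acc = (out, run)
def fscStepB (acc : List (List Char) × List Char) (w : List Char) : List (List Char) × List Char :=
  if PySem.Chars.len w == 1 && pvStrIsupper w then
    (acc.1, acc.2 ++ w)
  else if !acc.2.isEmpty
          && ((PySem.List.pyGet? w (0 : Int)).elim false PySem.Chars.isupper)
          && decide (1 < PySem.Chars.len w)
          && !(PySem.Chars.strIsalnum (PySem.List.slice w (some (1 : Int)) none)) then
    (acc.1 ++ [acc.2 ++ w], [])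
  else
    ((if acc.2.isEmpty then acc.1 else acc.1 ++ [acc.2]) ++ [w], [])

-- the final `if run: out.append(run)`
def fscFlushB (acc : List (List Char) × List Char) : List (List Char) :=
  if acc.2.isEmpty then acc.1 else acc.1 ++ [acc.2]

def fix_spaced_caps_alt (text : String) : String :=
  String.ofList (PySem.Chars.join [' ']
    (fscFlushB ((PySem.Chars.split₀ text.toList).foldl fscStepB ([], []))))

-- ===== PRECONDITION & SPEC =====
def Spec_fix_spaced_caps (text : String) (out : String) : Prop := out = fix_spaced_caps_alt text
instance (text : String) (out : String) : Decidable (Spec_fix_spaced_caps text out) := by unfold Spec_fix_spaced_caps; infer_instance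

-- ===== CLAIM (what is proved, stated in full; the proofs are below) =====
def Claim_equal_fix_spaced_caps : Prop := ∀ (text : String), Dom_fix_spaced_caps text → Spec_fix_spaced_caps text (fix_spaced_caps text)

-- ===== LEMMAS AND PROOFS =====

-- if A's inner loop consumed nothing, it returns its initial `combined`
theorem fscInnerA_zero (ws : List (List Char)) (comb : List Char)
    (h : (fscInnerA ws comb).2 = 0) : (fscInnerA ws comb).1 = comb := by
  cases ws with
  | nil => rfl
  | cons w rest =>
    simp only [fscInnerA] at h ⊢
    split_ifs at h ⊢ <;> simp_all

-- the core correspondence: B's fold with empty run equals A's outer loop, and B's fold with a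
-- pending nonempty run equals A's inner loop followed by A's outer loop on the rest
theorem pv_joint (ws : List (List Char)) :
    (∀ out, fscFlushB (ws.foldl fscStepB (out, [])) = fscOuterA ws out) ∧
    (∀ out run, run ≠ [] →
      fscFlushB (ws.foldl fscStepB (out, run)) =
        fscOuterA (ws.drop (fscInnerA ws run).2) (out ++ [(fscInnerA ws run).1])) := by
  induction ws with
  | nil =>
    refine ⟨fun out => by simp [fscFlushB, fscOuterA], fun out run h => ?_⟩
    simp [fscFlushB, fscOuterA, fscInnerA, h]
  | cons w rest ih =>
    obtain ⟨ih1, ih2⟩ := ih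
    by_cases hc : (PySem.Chars.len w == 1 && pvStrIsupper w) = true
    · -- w is a single uppercase letter: both sides extend the run
      have hw : w ≠ [] := by
        rcases w with _ | ⟨c, cs⟩
        · simp [pvStrIsupper] at hc
        · simp
      have hstep : ∀ acc, fscStepB acc w = (acc.1, acc.2 ++ w) := by
        intro acc; unfold fscStepB; split_ifs with h1 h2 <;> simp_all
      refine ⟨fun out => ?_, fun out run hrun => ?_⟩
      · rw [List.foldl_cons, hstep, show ([] : List Char) ++ w = w by simp, ih2 out w hw]
        simp only [fscOuterA, hc, if_true]
        rcases Nat.eq_zero_or_pos (fscInnerA rest w).2 with h0 | hpos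
        · simp [h0, fscInnerA_zero rest w h0]
        · simp [hpos]
      · rw [List.foldl_cons, hstep, ih2 out (run ++ w) (by simp [hw])]
        simp only [fscInnerA, hc, if_true, List.drop_succ_cons]
    · refine ⟨fun out => ?_, fun out run hrun => ?_⟩
      · -- run empty: w is emitted verbatim by both sides
        have hstep : fscStepB (out, []) w = (out ++ [w], []) := by
          unfold fscStepB; split_ifs with h1 h2 <;> simp_all
        rw [List.foldl_cons, hstep, ih1 (out ++ [w])]
        simp only [fscOuterA]; rw [if_neg hc]
      · by_cases hs : (((PySem.List.pyGet? w (0 : Int)).elim false PySem.Chars.isupper)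
            && decide (1 < PySem.Chars.len w)
            && !(PySem.Chars.strIsalnum (PySem.List.slice w (some (1 : Int)) none))) = true
        · -- suffix word: the run merges with it and closes
          have hstep : fscStepB (out, run) w = (out ++ [run ++ w], []) := by
            unfold fscStepB; split_ifs with h1 h2 <;> simp_all
          rw [List.foldl_cons, hstep, ih1 (out ++ [run ++ w])]
          obtain ⟨c, cs, rfl⟩ : ∃ c cs, w = c :: cs := by
            rcases w with _ | ⟨c, cs⟩
            · simp [PySem.Chars.len] at hs
            · exact ⟨c, cs, rfl⟩
          have hinner : fscInnerA ((c :: cs) :: rest) run = (run ++ (c :: cs), 1) := by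
            unfold fscInnerA; split_ifs with h1 h2 <;>
              simp_all [PySem.List.pyGet?, PySem.List.pyIdx?, PySem.List.slice_from_one]
          rw [hinner]
          simp
        · -- ordinary word: the pending run flushes, then w is emitted
          have hstep : fscStepB (out, run) w = (out ++ [run] ++ [w], []) := by
            unfold fscStepB; split_ifs with h1 h2 <;> simp_all
          rw [List.foldl_cons, hstep, ih1 (out ++ [run] ++ [w])]
          have hinner : fscInnerA (w :: rest) run = (run, 0) := by
            unfold fscInnerA; split_ifs with h1 h2 <;> simp_all
          rw [hinner]
          simp only [List.drop_zero, fscOuterA]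
          rw [if_neg hc]

-- ===== VERDICT (by name: the statement is the Claim_ definition above) =====
theorem fix_spaced_caps_spec : Claim_equal_fix_spaced_caps := by
  intro text _
  unfold Spec_fix_spaced_caps fix_spaced_caps fix_spaced_caps_alt
  rw [(pv_joint (PySem.Chars.split₀ text.toList)).1 []]
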